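-- pv_equiv track=rewrite | github.com/siimveske/scratchpad | min_block.py | min_block2
-- ===== SOURCE A (Python) =====
-- def min_block2(s):
--     if not s:
--         return 0
--
--     min_len = float("inf")
--     current_len = 1
--
--     # Iterate starting from the second character
--     for i in range(1, len(s)):
--         if s[i] == s[i - 1]:
--             # Same as previous char, extend the block
--             current_len += 1
--         else:
--             # New character found, check if the previous block was the smallest
--             if current_len < min_len:
--                 min_len = current_len
--             # Reset counter for the new block
--             current_len = 1
--
--     # CRITICAL: Check the length of the very last block after the loop finishes
--     if current_len < min_len:
--         min_len = current_len
--
--     return min_len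
-- ===== SOURCE B (Python) =====
-- def min_block2(s):
--     n = len(s)
--     if n == 0:
--         return 0
--     cuts = [0] + [i for i in range(1, n) if s[i] != s[i - 1]] + [n]
--     return min(b - a for a, b in zip(cuts, cuts[1:]))
-- ===== Notes on version B (the rewrite author's own statement) =====
-- stated objective: alternative
-- what changed: B works with boundary positions instead of run lengths: it builds the list of change-point indices where s[i] != s[i-1], brackets it with 0 and n, and returns the minimum adjacent difference of these cut positions, replacing A's running counter with incremental min updates and a final flush.
import Mathlib
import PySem

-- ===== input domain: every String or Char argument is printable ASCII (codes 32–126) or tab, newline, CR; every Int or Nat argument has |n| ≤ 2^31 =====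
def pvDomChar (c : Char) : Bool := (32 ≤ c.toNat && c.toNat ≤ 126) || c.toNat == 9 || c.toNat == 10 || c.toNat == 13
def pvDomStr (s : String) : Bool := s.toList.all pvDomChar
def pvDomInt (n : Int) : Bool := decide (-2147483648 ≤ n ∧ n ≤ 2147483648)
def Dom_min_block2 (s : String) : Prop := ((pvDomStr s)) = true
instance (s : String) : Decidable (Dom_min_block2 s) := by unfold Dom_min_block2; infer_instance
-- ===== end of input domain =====

-- B replaces A's running run-length counter (with incremental min updates and a final flush)
-- by boundary positions: the list of change-point indices bracketed with 0 and n, whose minimum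
-- adjacent difference is the answer; same O(n) cost, alternative structure.

-- ===== PORT A =====
-- 'min_len = float("inf")' is ported as Option Int with none = inf; pyLtInf is 'current_len < min_len'.
def pyLtInf (c : Int) (m : Option Int) : Bool :=
  match m with
  | none => true
  | some v => decide (c < v)

def min_block2 (s : String) : Int :=
  let cs := s.toList
  if cs.length = 0 then 0
  else
    let st := (PySem.List.pyRange 1 (cs.length : Int) 1).foldl
      (fun (st : Option Int × Int) i =>
        if PySem.List.pyGetD cs i ' ' == PySem.List.pyGetD cs (i - 1) ' ' then
          (st.1, st.2 + 1)
        else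
          (if pyLtInf st.2 st.1 then some st.2 else st.1, 1))
      (none, 1)
    -- final flush; the 'none' branch is Python's unreachable float('inf') return
    match (if pyLtInf st.2 st.1 then some st.2 else st.1) with
    | some v => v
    | none => 0

-- ===== PORT B =====
def min_block2_alt (s : String) : Int :=
  let cs := s.toList
  let n : Int := (cs.length : Int)
  if cs.length = 0 then 0
  else
    -- cuts = [0] + [i for i in range(1, n) if s[i] != s[i-1]] + [n]
    let cuts : List Int :=
      0 :: ((PySem.List.pyRange 1 n 1).filter
              (fun i => !(PySem.List.pyGetD cs i ' ' == PySem.List.pyGetD cs (i - 1) ' ')) ++ [n])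
    -- min(b - a for a, b in zip(cuts, cuts[1:]))
    match (List.zip cuts cuts.tail).map (fun p => p.2 - p.1) with
    | [] => 0                 -- unreachable: cuts always has at least two entries
    | h :: t => t.foldl min h

-- ===== PRECONDITION & SPEC =====
def Spec_min_block2 (s : String) (out : Int) : Prop := out = min_block2_alt s
instance (s : String) (out : Int) : Decidable (Spec_min_block2 s out) := by unfold Spec_min_block2; infer_instance

-- ===== CLAIM (what is proved, stated in full; the proofs are below) =====
def Claim_equal_min_block2 : Prop := ∀ (s : String), Dom_min_block2 s → Spec_min_block2 s (min_block2 s)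

-- ===== LEMMAS AND PROOFS =====

-- generic fold over consecutive pairs, tracking the previous character
def pairFold {σ : Type} (g : σ → Char → Char → σ) : Char → List Char → σ → σ
  | _, [], st => st
  | prev, y :: ys, st => pairFold g y ys (g st prev y)

-- A's index loop over range(1, len) reading s[i-1], s[i] is the pair fold
lemma idx_to_pairs {σ : Type} (g : σ → Char → Char → σ) (d : Char) :
    ∀ (suf pre : List Char) (x : Char) (init : σ),
      (PySem.List.pyRange ((pre.length : Int) + 1) (((pre ++ x :: suf).length : Int)) 1).foldl
        (fun p i => g p (PySem.List.pyGetD (pre ++ x :: suf) (i - 1) d)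
                        (PySem.List.pyGetD (pre ++ x :: suf) i d)) init
      = pairFold g x suf init := by
  intro suf
  induction suf with
  | nil =>
    intro pre x init
    rw [PySem.List.pyRange_one_eq_nil (by simp)]
    rfl
  | cons y ys ih =>
    intro pre x init
    rw [PySem.List.pyRange_one_cons (by simp)]
    simp only [List.foldl_cons]
    have h1 : PySem.List.pyGetD (pre ++ x :: y :: ys) ((pre.length : Int) + 1 - 1) d = x := by
      have : ((pre.length : Int) + 1 - 1) = (pre.length : Int) := by omega
      rw [this, PySem.List.pyGetD_natCast]
      simp
    have h2 : PySem.List.pyGetD (pre ++ x :: y :: ys) ((pre.length : Int) + 1) d = y := by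
      have : ((pre.length : Int) + 1) = ((pre.length + 1 : Nat) : Int) := by omega
      rw [this, PySem.List.pyGetD_natCast]
      have : pre ++ x :: y :: ys = (pre ++ [x]) ++ y :: ys := by simp
      rw [this]
      rw [List.getD_eq_getElem?_getD, List.getElem?_append_right (by simp)]
      simp
    rw [h1, h2]
    have hcs : pre ++ x :: y :: ys = (pre ++ [x]) ++ y :: ys := by simp
    have hlen : (pre.length : Int) + 2 = (((pre ++ [x]).length : Nat) : Int) + 1 := by
      simp; omega
    calc (PySem.List.pyRange ((pre.length : Int) + 1 + 1) (((pre ++ x :: y :: ys).length : Int)) 1).foldl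
          (fun p i => g p (PySem.List.pyGetD (pre ++ x :: y :: ys) (i - 1) d)
                          (PySem.List.pyGetD (pre ++ x :: y :: ys) i d)) (g init x y)
        = (PySem.List.pyRange ((((pre ++ [x]).length : Nat) : Int) + 1) ((((pre ++ [x]) ++ y :: ys).length : Int)) 1).foldl
          (fun p i => g p (PySem.List.pyGetD ((pre ++ [x]) ++ y :: ys) (i - 1) d)
                          (PySem.List.pyGetD ((pre ++ [x]) ++ y :: ys) i d)) (g init x y) := by
          have e : (pre.length : Int) + 1 + 1 = (pre.length : Int) + 2 := by ring
          rw [e, ← hcs, ← hlen]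
      _ = pairFold g y ys (g init x y) := ih (pre ++ [x]) y (g init x y)
      _ = pairFold g x (y :: ys) init := rfl

-- A's loop body as a pair-step
def gA (st : Option Int × Int) (prev y : Char) : Option Int × Int :=
  if y == prev then (st.1, st.2 + 1)
  else (if pyLtInf st.2 st.1 then some st.2 else st.1, 1)

def omin (m : Option Int) (c : Int) : Int :=
  match m with
  | none => c
  | some v => min v c

def finalA (st : Option Int × Int) : Int :=
  match (if pyLtInf st.2 st.1 then some st.2 else st.1) with
  | some v => v
  | none => 0

lemma finalA_eq (m : Option Int) (c : Int) : finalA (m, c) = omin m c := by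
  cases m with
  | none => simp [finalA, pyLtInf, omin]
  | some v =>
    simp only [finalA, pyLtInf, omin]
    split_ifs with h <;> simp_all <;> omega

lemma updA_eq (m : Option Int) (c : Int) :
    (if pyLtInf c m then some c else m) = some (omin m c) := by
  cases m with
  | none => simp [pyLtInf, omin]
  | some v =>
    simp only [pyLtInf, omin]
    split_ifs with h <;> simp_all <;> omega

-- running min seeded with the (possibly absent) min so far
def listOmin (m : Option Int) : List Int → Int
  | [] => match m with | none => 0 | some v => v
  | x :: xs => listOmin (some (omin m x)) xs

-- runs with a partially counted current run
def runsC (prev : Char) (c : Int) : List Char → List Int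
  | [] => [c]
  | y :: ys => if y == prev then runsC y (c + 1) ys else c :: runsC y 1 ys

lemma L1 : ∀ (rest : List Char) (prev : Char) (m : Option Int) (c : Int),
    finalA (pairFold gA prev rest (m, c)) = listOmin m (runsC prev c rest) := by
  intro rest
  induction rest with
  | nil =>
    intro prev m c
    simp [pairFold, runsC, finalA_eq]
    cases m <;> simp [listOmin, omin]
  | cons y ys ih =>
    intro prev m c
    by_cases h : (y == prev) = true
    · simp only [pairFold, runsC, gA, h, if_true]
      exact ih y m (c + 1)
    · simp only [pairFold, runsC, gA, h, if_false, Bool.false_eq_true]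
      rw [updA_eq]
      rw [ih y (some (omin m c)) 1]
      rfl

lemma L3 : ∀ (t : List Int) (v : Int), listOmin (some v) t = t.foldl min v := by
  intro t
  induction t with
  | nil => intro v; rfl
  | cons x xs ih => intro v; simp only [listOmin, omin, List.foldl_cons]; exact ih (min v x)

-- B-side: change points of the suffix, starting at absolute position p, previous char prev
def chg (prev : Char) (p : Int) : List Char → List Int
  | [] => []
  | y :: ys => if y == prev then chg y (p + 1) ys else p :: chg y (p + 1) ys

-- B's filtered range of change indices is chg
lemma filter_to_chg (d : Char) :
    ∀ (suf pre : List Char) (x : Char),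
      (PySem.List.pyRange ((pre.length : Int) + 1) (((pre ++ x :: suf).length : Int)) 1).filter
        (fun i => !(PySem.List.pyGetD (pre ++ x :: suf) i d == PySem.List.pyGetD (pre ++ x :: suf) (i - 1) d))
      = chg x ((pre.length : Int) + 1) suf := by
  intro suf
  induction suf with
  | nil =>
    intro pre x
    rw [PySem.List.pyRange_one_eq_nil (by simp)]
    rfl
  | cons y ys ih =>
    intro pre x
    rw [PySem.List.pyRange_one_cons (by simp)]
    rw [List.filter_cons]
    have h1 : PySem.List.pyGetD (pre ++ x :: y :: ys) ((pre.length : Int) + 1 - 1) d = x := by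
      have : ((pre.length : Int) + 1 - 1) = (pre.length : Int) := by omega
      rw [this, PySem.List.pyGetD_natCast]
      simp
    have h2 : PySem.List.pyGetD (pre ++ x :: y :: ys) ((pre.length : Int) + 1) d = y := by
      have : ((pre.length : Int) + 1) = ((pre.length + 1 : Nat) : Int) := by omega
      rw [this, PySem.List.pyGetD_natCast]
      have : pre ++ x :: y :: ys = (pre ++ [x]) ++ y :: ys := by simp
      rw [this]
      rw [List.getD_eq_getElem?_getD, List.getElem?_append_right (by simp)]
      simp
    have hcs : pre ++ x :: y :: ys = (pre ++ [x]) ++ y :: ys := by simp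
    have hlen : ((pre ++ x :: y :: ys).length : Int) = (((pre ++ [x]) ++ y :: ys).length : Int) := by
      rw [hcs]
    have hrec :
        (PySem.List.pyRange ((pre.length : Int) + 1 + 1) (((pre ++ x :: y :: ys).length : Int)) 1).filter
          (fun i => !(PySem.List.pyGetD (pre ++ x :: y :: ys) i d == PySem.List.pyGetD (pre ++ x :: y :: ys) (i - 1) d))
        = chg y ((pre.length : Int) + 2) ys := by
      have e : (pre.length : Int) + 1 + 1 = (((pre ++ [x]).length : Nat) : Int) + 1 := by
        simp
      rw [e, hlen, hcs]
      rw [ih (pre ++ [x]) y]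
      congr 1
      simp; omega
    by_cases h : (y == x) = true
    · simp only [h1, h2, h, Bool.not_true, chg, if_true]
      rw [if_neg (by simp [h1, h2, h]), hrec]
      rfl
    · have hne : (y == x) = false := by simpa using h
      simp only [chg, hne, Bool.false_eq_true, if_false]
      rw [if_pos (by simp [h1, h2, hne]), hrec]
      rfl

-- adjacent differences of a list of positions
def adjDiffs : List Int → List Int
  | a :: b :: t => (b - a) :: adjDiffs (b :: t)
  | _ => []

lemma zipdiff_eq_adjDiffs : ∀ (l : List Int),
    (List.zip l l.tail).map (fun p => p.2 - p.1) = adjDiffs l := by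
  intro l
  induction l with
  | nil => rfl
  | cons a t ih =>
    cases t with
    | nil => rfl
    | cons b t' =>
      simp only [List.tail_cons, List.zip_cons_cons, List.map_cons, adjDiffs]
      rw [← ih]
      rfl

-- adjacent differences of the bracketed change points are the run lengths
lemma diffs_eq_runs : ∀ (rest : List Char) (prev : Char) (a p : Int),
    adjDiffs (a :: (chg prev p rest ++ [p + (rest.length : Int)])) = runsC prev (p - a) rest := by
  intro rest
  induction rest with
  | nil =>
    intro prev a p
    simp [chg, adjDiffs, runsC]
  | cons y ys ih =>
    intro prev a p
    by_cases h : (y == prev) = true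
    · have e : p + ((y :: ys).length : Int) = (p + 1) + (ys.length : Int) := by
        simp only [List.length_cons]; push_cast; ring
      simp only [chg, h, if_true, runsC, e]
      rw [ih y a (p + 1), show p + 1 - a = p - a + 1 from by ring]
    · have hne : (y == prev) = false := by simpa using h
      have e : p + ((y :: ys).length : Int) = (p + 1) + (ys.length : Int) := by
        simp only [List.length_cons]; push_cast; ring
      simp only [chg, hne, Bool.false_eq_true, if_false, runsC, e, List.cons_append, adjDiffs]
      rw [ih y p (p + 1), show p + 1 - p = (1 : Int) from by ring]

lemma runsC_ne_nil : ∀ (rest : List Char) (prev : Char) (c : Int), runsC prev c rest ≠ [] := by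
  intro rest
  induction rest with
  | nil => intro prev c; simp [runsC]
  | cons y ys ih =>
    intro prev c
    by_cases h : (y == prev) = true <;> simp [runsC, h]
    exact ih y (c + 1)

-- ===== VERDICT (by name: the statement is the Claim_ definition above) =====
theorem min_block2_spec : Claim_equal_min_block2 := by
  intro s _
  unfold Spec_min_block2 min_block2 min_block2_alt
  cases hcs : s.toList with
  | nil => simp
  | cons c rest =>
    simp only [List.length_cons]
    have hne : ¬ (rest.length + 1 = 0) := by omega
    rw [if_neg hne, if_neg hne]
    -- A side: fold = pairFold, then run lengths
    have hidx := idx_to_pairs gA ' ' rest [] c (((none : Option Int), (1 : Int)))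
    simp only [List.nil_append, List.length_nil, Nat.cast_zero, zero_add] at hidx
    have hA : ((PySem.List.pyRange 1 ((rest.length + 1 : Nat) : Int) 1).foldl
        (fun (st : Option Int × Int) i =>
          if PySem.List.pyGetD (c :: rest) i ' ' == PySem.List.pyGetD (c :: rest) (i - 1) ' ' then
            (st.1, st.2 + 1)
          else
            (if pyLtInf st.2 st.1 then some st.2 else st.1, 1))
        (none, 1)) = pairFold gA c rest (none, 1) := by
      rw [← hidx]
      congr 1
    -- B side: filter = chg, diffs = run lengths
    have hflt := filter_to_chg ' ' rest [] c
    simp only [List.nil_append, List.length_nil, Nat.cast_zero, zero_add] at hflt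
    have hcuts :
        ((PySem.List.pyRange 1 (((c :: rest).length : Nat) : Int) 1).filter
          (fun i => !(PySem.List.pyGetD (c :: rest) i ' ' == PySem.List.pyGetD (c :: rest) (i - 1) ' ')))
        = chg c 1 rest := by
      rw [← hflt]
    have hdiffs :
        (List.zip (0 :: (chg c 1 rest ++ [(((c :: rest).length : Nat) : Int)]))
            ((0 :: (chg c 1 rest ++ [(((c :: rest).length : Nat) : Int)])).tail)).map
          (fun p => p.2 - p.1) = runsC c 1 rest := by
      rw [zipdiff_eq_adjDiffs]
      have e : (((c :: rest).length : Nat) : Int) = 1 + (rest.length : Int) := by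
        simp; omega
      rw [e]
      have := diffs_eq_runs rest c 0 1
      simpa using this
    rw [hA]
    show finalA (pairFold gA c rest ((none : Option Int), (1 : Int))) = _
    rw [L1]
    rw [show ((rest.length + 1 : Nat) : Int) = (((c :: rest).length : Nat) : Int) from by simp]
    rw [hcuts, hdiffs]
    cases hr : runsC c 1 rest with
    | nil => exact absurd hr (runsC_ne_nil rest c 1)
    | cons h t =>
      simp only [listOmin, omin]
      exact L3 t h
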